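-- pv_equiv track=rewrite | github.com/dawoodaijaz97/Leetcode | maximum-good-subtree-score/solution.py | solve
-- ===== SOURCE A (Python) =====
-- from typing import List
--
-- MOD = 10**9 + 7
--
-- def solve(vals: List[int], par: List[int]) -> int:
--     from collections import defaultdict, Counter
--
--     n = len(vals)
--     tree = defaultdict(list)
--
--     for i in range(1, n):
--         tree[par[i]].append(i)
--
--     def dfs(node: int) -> (int, int):
--         max_score = 0
--         digit_count = Counter()
--
--         for child in tree[node]:
--             child_score, child_digits = dfs(child)
--             if all(digit_count[d] == 0 for d in child_digits):
--                 max_score += child_score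
--                 digit_count.update(child_digits)
--
--         current_digit_count = Counter(str(vals[node]))
--         if all(digit_count[d] == 0 for d in current_digit_count):
--             max_score += vals[node]
--             digit_count.update(current_digit_count)
--
--         return max_score, digit_count
--
--     total_sum = 0
--     for i in range(n):
--         max_score, _ = dfs(i)
--         total_sum = (total_sum + max_score) % MOD
--
--     return total_sum
-- ===== SOURCE B (Python) =====
-- from typing import List
--
-- MOD = 10 ** 9 + 7
--
-- def solve(vals: List[int], par: List[int]) -> int:
--     n = len(vals)
--     children = {}
--     for i in range(1, n):
--         children.setdefault(par[i], []).append(i)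
--
--     def step(table):
--         new = {}
--         for node in range(n):
--             s = 0
--             used = frozenset()
--             for c in children.get(node, []):
--                 cs, cset = table[c]
--                 if used.isdisjoint(cset):
--                     s += cs
--                     used |= cset
--             own = frozenset(str(vals[node]))
--             if used.isdisjoint(own):
--                 s += vals[node]
--                 used |= own
--             new[node] = (s, used)
--         return new
--
--     # Jacobi fixed-point iteration: round k gives each node its depth-k truncated
--     # greedy score; stable after (height of forest)+1 rounds, n+1 rounds always enough.
--     table = {i: (0, frozenset()) for i in range(n)}
--     for _ in range(n + 1):
--         new = step(table)
--         if new == table: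
--             break
--         table = new
--     return sum(table[i][0] for i in range(n)) % MOD
-- ===== Notes on version B (the rewrite author's own statement) =====
-- stated objective: alternative
-- what changed: A runs a fresh recursive dfs (rebuilding digit Counters) from every one of the n nodes; B computes all n subtree scores together, without recursion, by a bottom-up Jacobi fixed-point iteration on a single score/digit-frozenset table, repeated until the table is stable (height+1 rounds).
import Mathlib
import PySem

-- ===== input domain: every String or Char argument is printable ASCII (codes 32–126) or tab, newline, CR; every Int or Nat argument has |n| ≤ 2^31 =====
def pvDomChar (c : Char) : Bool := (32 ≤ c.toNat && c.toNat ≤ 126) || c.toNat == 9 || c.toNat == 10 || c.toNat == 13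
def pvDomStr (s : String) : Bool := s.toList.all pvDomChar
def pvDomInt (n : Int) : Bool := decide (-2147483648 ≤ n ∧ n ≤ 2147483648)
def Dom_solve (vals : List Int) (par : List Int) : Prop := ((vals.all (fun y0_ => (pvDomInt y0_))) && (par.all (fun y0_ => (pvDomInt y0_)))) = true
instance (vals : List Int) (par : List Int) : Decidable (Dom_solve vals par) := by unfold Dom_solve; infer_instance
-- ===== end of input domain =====

-- B replaces A's fresh recursive dfs from every node by a bottom-up Jacobi fixed-point
-- iteration over one score/digit-set table (frozensets instead of Counters); objective:
-- alternative (no recursion, the table is shared by all nodes, early exit once stable).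

-- ===== PORT A =====
-- tree = defaultdict(list); for i in range(1, n): tree[par[i]].append(i)
def treeA (par : List Int) (n : Nat) : PySem.Dict Int (List Int) :=
  (PySem.List.pyRange 1 (n : Int) 1).foldl
    (fun t i => t.modify (PySem.List.pyGetD par i 0) [] (fun l => l ++ [i]))
    PySem.Dict.empty

-- digit_count.update(other): Counter.update adds counts, new keys appended in other's order
def counterAddA (dc : PySem.Dict Char Int) (src : PySem.Dict Char Int) : PySem.Dict Char Int :=
  src.items.foldl (fun d p => d.modify p.1 0 (fun v => v + p.2)) dc

-- the body of dfs(node); 'rec' is the recursive call on the children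
def bodyA (vals : List Int) (tree : PySem.Dict Int (List Int))
    (rec : Int → Int × PySem.Dict Char Int) (node : Int) : Int × PySem.Dict Char Int :=
  let r := (tree.getD node []).foldl
    (fun acc child =>
      let cr := rec child
      if cr.2.keys.all (fun d => acc.2.getD d 0 == 0) then
        (acc.1 + cr.1, counterAddA acc.2 cr.2)
      else acc)
    ((0 : Int), PySem.Dict.empty)
  let cur := PySem.Dict.counter (PySem.Int.toStr (PySem.List.pyGetD vals node 0)).toList
  if cur.keys.all (fun d => r.2.getD d 0 == 0) then
    (r.1 + PySem.List.pyGetD vals node 0, counterAddA r.2 cur)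
  else r

-- dfs(node); the Python recursion carries no fuel: under Pre_solve the parent chains are
-- acyclic and at most n long, so fuel n+1 (as called in solve) is never exhausted
def dfsA (vals : List Int) (tree : PySem.Dict Int (List Int)) :
    Nat → Int → Int × PySem.Dict Char Int
  | 0, _ => (0, PySem.Dict.empty)
  | fuel+1, node => bodyA vals tree (dfsA vals tree fuel) node

def solve (vals : List Int) (par : List Int) : Int :=
  let n := vals.length
  let tree := treeA par n
  (PySem.List.pyRange 0 (n : Int) 1).foldl
    (fun total i => PySem.Int.mod (total + (dfsA vals tree (n+1) i).1) 1000000007) 0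

-- ===== PORT B =====
abbrev TblB : Type := PySem.Dict Int (Int × PySem.Set Char)

def dfltB : Int × PySem.Set Char := (0, PySem.Set.empty)

-- children.setdefault(par[i], []).append(i)  (= store children.get(par[i], []) + [i])
def childrenB (par : List Int) (n : Nat) : PySem.Dict Int (List Int) :=
  (PySem.List.pyRange 1 (n : Int) 1).foldl
    (fun t i => t.insert (PySem.List.pyGetD par i 0)
      (t.getD (PySem.List.pyGetD par i 0) [] ++ [i]))
    PySem.Dict.empty

-- the per-node body of step(table); table[c] is always a hit (keys are range(n)), ported as getD
def bodyB (vals : List Int) (children : PySem.Dict Int (List Int)) (table : TblB)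
    (node : Int) : Int × PySem.Set Char :=
  let r := (children.getD node []).foldl
    (fun acc c =>
      let p := table.getD c dfltB
      if PySem.Set.isdisjoint acc.2 p.2 then (acc.1 + p.1, PySem.Set.update acc.2 p.2)
      else acc)
    ((0 : Int), PySem.Set.empty)
  let own := PySem.Set.ofList (PySem.Int.toStr (PySem.List.pyGetD vals node 0)).toList
  if PySem.Set.isdisjoint r.2 own then
    (r.1 + PySem.List.pyGetD vals node 0, PySem.Set.update r.2 own)
  else r

-- step(table): one Jacobi round, new[node] = bodyB(..., node)
def stepB (vals : List Int) (children : PySem.Dict Int (List Int)) (n : Nat)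
    (table : TblB) : TblB :=
  (PySem.List.pyRange 0 (n : Int) 1).foldl
    (fun new node => new.insert node (bodyB vals children table node))
    PySem.Dict.empty

-- Python's 'new == table': both dicts have key set range(n) by construction, so dict ==
-- is a per-key comparison; frozenset '==' is set equality (PySem.Set.equal)
def tblEqB (n : Nat) (t1 t2 : TblB) : Bool :=
  (PySem.List.pyRange 0 (n : Int) 1).all (fun i =>
    ((t1.getD i dfltB).1 == (t2.getD i dfltB).1) &&
    PySem.Set.equal (t1.getD i dfltB).2 (t2.getD i dfltB).2)

-- for _ in range(n+1): new = step(table); if new == table: break; table = new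
def loopB (vals : List Int) (children : PySem.Dict Int (List Int)) (n : Nat) :
    Nat → TblB → TblB
  | 0, table => table
  | k+1, table =>
    let new := stepB vals children n table
    if tblEqB n new table then table else loopB vals children n k new

-- table = {i: (0, frozenset()) for i in range(n)}
def tbl0B (n : Nat) : TblB :=
  (PySem.List.pyRange 0 (n : Int) 1).foldl (fun t i => t.insert i dfltB) PySem.Dict.empty

def solve_alt (vals : List Int) (par : List Int) : Int :=
  let n := vals.length
  let children := childrenB par n
  let table := loopB vals children n (n+1) (tbl0B n)
  PySem.Int.mod
    ((PySem.List.pyRange 0 (n : Int) 1).foldl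
      (fun s i => s + (table.getD i dfltB).1) 0)
    1000000007

-- ===== PRECONDITION & SPEC =====
-- following par from j, staying inside [1, n), leaves [1, n) within the given number of steps
def escapesA (par : List Int) (n : Nat) : Nat → Int → Bool
  | 0, j => !(decide (1 ≤ j ∧ j < (n : Int)))
  | f+1, j => !(decide (1 ≤ j ∧ j < (n : Int))) || escapesA par n f (PySem.List.pyGetD par j 0)

-- Pre_solve = exactly where the Python A returns: par long enough (else IndexError) and the
-- parent chains acyclic (on a cycle among indices 1..n-1 dfs recurses forever: RecursionError);
-- by pigeonhole a chain that does not leave [1,n) within n steps is cyclic.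
-- (CPython's fixed recursion-depth limit on very deep yet acyclic forests is not modelled.)
-- The Lean-level equality of the two ports holds for ALL inputs; Pre_solve only delimits
-- the inputs on which the Python A returns at all.
def Pre_solve (vals : List Int) (par : List Int) : Prop :=
  (vals.length ≤ 1 ∨ vals.length ≤ par.length) ∧
  ∀ i ∈ List.range vals.length, escapesA par vals.length vals.length ((i : Nat) : Int) = true

instance (vals : List Int) (par : List Int) : Decidable (Pre_solve vals par) := by
  unfold Pre_solve; infer_instance

def pvWitness_solve : List Int × List Int := ([5, 3, 6], [-1, 0, 0])

def Spec_solve (vals : List Int) (par : List Int) (out : Int) : Prop := out = solve_alt vals par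
instance (vals : List Int) (par : List Int) (out : Int) : Decidable (Spec_solve vals par out) := by unfold Spec_solve; infer_instance

-- ===== CLAIM (what is proved, stated in full; the proofs are below) =====
def Claim_equal_solve : Prop := ∀ (vals : List Int) (par : List Int), Dom_solve vals par → Pre_solve vals par → Spec_solve vals par (solve vals par)

-- ===== LEMMAS AND PROOFS =====

-- A's digit Counters vs B's digit sets: same keys (as a set, keys unique) and every
-- stored count is positive
def RelC (cnt : PySem.Dict Char Int) (s : PySem.Set Char) : Prop :=
  cnt.keys.Nodup ∧ (∀ d, d ∈ cnt.keys ↔ d ∈ s) ∧ (∀ d ∈ cnt.keys, (0 : Int) < cnt.getD d 0)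

theorem bool_ext {a b : Bool} (h : a = true ↔ b = true) : a = b := by
  cases a <;> cases b <;> simp_all

theorem relC_empty : RelC PySem.Dict.empty PySem.Set.empty := by
  refine ⟨?_, ?_, ?_⟩ <;> simp [PySem.Dict.empty, PySem.Dict.keys_mk, PySem.Set.empty]

theorem getD_zero_of_not_mem (cnt : PySem.Dict Char Int) (d : Char) (hd : d ∉ cnt.keys) :
    cnt.getD d 0 = 0 := by
  apply PySem.Dict.getD_of_not_contains
  rw [PySem.Dict.contains_eq_decide_mem_keys]
  simp [hd]

theorem relC_getD_zero_iff (dc : PySem.Dict Char Int) (s : PySem.Set Char)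
    (h : RelC dc s) (d : Char) : dc.getD d 0 = 0 ↔ d ∉ s := by
  constructor
  · intro h0 hs
    have hk := (h.2.1 d).mpr hs
    have := h.2.2 d hk
    omega
  · intro hs
    exact getD_zero_of_not_mem _ _ (fun hk => hs ((h.2.1 d).mp hk))

theorem cond_eq (dc : PySem.Dict Char Int) (s : PySem.Set Char)
    (cd : PySem.Dict Char Int) (st : PySem.Set Char)
    (h1 : RelC dc s) (h2 : RelC cd st) :
    (cd.keys.all fun d => dc.getD d 0 == 0) = PySem.Set.isdisjoint s st := by
  apply bool_ext
  rw [List.all_eq_true, PySem.Set.isdisjoint_iff]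
  constructor
  · intro h x hx hxt
    have hk := (h2.2.1 x).mpr hxt
    have := h x hk
    rw [beq_iff_eq] at this
    exact (relC_getD_zero_iff dc s h1 x).mp this hx
  · intro h d hk
    rw [beq_iff_eq]
    exact (relC_getD_zero_iff dc s h1 d).mpr (fun hds => h d hds ((h2.2.1 d).mp hk))

theorem get?_of_mem_items_nodup (l : List (Char × Int))
    (hnd : (l.map Prod.fst).Nodup) {p : Char × Int} (hp : p ∈ l) :
    (PySem.Dict.mk l).get? p.1 = some p.2 := by
  induction l with
  | nil => cases hp
  | cons q rest ih =>
    rw [PySem.Dict.get?_mk_cons]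
    rcases List.mem_cons.mp hp with h | h
    · subst h; simp
    · have hne : (q.1 == p.1) = false := by
        have : p.1 ∈ rest.map Prod.fst := List.mem_map.mpr ⟨p, h, rfl⟩
        have : q.1 ≠ p.1 := fun he => (List.nodup_cons.mp hnd).1 (he ▸ this)
        simp [this]
      rw [hne]
      simp only [Bool.false_eq_true, if_false]
      exact ih (List.nodup_cons.mp hnd).2 h

theorem relC_items_pos (cnt : PySem.Dict Char Int) (s : PySem.Set Char) (h : RelC cnt s) :
    ∀ p ∈ cnt.items, (0 : Int) < p.2 := by
  intro p hp
  obtain ⟨l⟩ := cnt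
  have hget : (PySem.Dict.mk l).get? p.1 = some p.2 :=
    get?_of_mem_items_nodup l (by simpa [PySem.Dict.keys_mk] using h.1) hp
  have hk : p.1 ∈ (PySem.Dict.mk l).keys := by
    rw [PySem.Dict.keys_mk]; exact List.mem_map.mpr ⟨p, hp, rfl⟩
  have := h.2.2 p.1 hk
  rwa [PySem.Dict.getD_eq_get?_getD, hget] at this

theorem pos_foldAdd (l : List (Char × Int)) (hl : ∀ p ∈ l, (0 : Int) < p.2) :
    ∀ (dc : PySem.Dict Char Int), (∀ d ∈ dc.keys, (0 : Int) < dc.getD d 0) →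
    ∀ d ∈ (l.foldl (fun d p => d.modify p.1 0 (fun v => v + p.2)) dc).keys,
      (0 : Int) < (l.foldl (fun d p => d.modify p.1 0 (fun v => v + p.2)) dc).getD d 0 := by
  induction l with
  | nil => intro dc hdc; simpa using hdc
  | cons q rest ih =>
    intro dc hdc
    simp only [List.foldl_cons]
    apply ih (fun p hp => hl p (List.mem_cons_of_mem _ hp))
    intro d hd
    rw [PySem.Dict.getD_modify]
    have hq : (0 : Int) < q.2 := hl q List.mem_cons_self
    by_cases hdq : d = q.1
    · rw [if_pos hdq]
      by_cases hmem : q.1 ∈ dc.keys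
      · have := hdc q.1 hmem; omega
      · rw [getD_zero_of_not_mem dc q.1 hmem]; omega
    · rw [if_neg hdq]
      rw [PySem.Dict.keys_modify] at hd
      rcases (PySem.Dict.mem_keys_insert _ _ _ _).mp hd with h | h
      · exact absurd h hdq
      · exact hdc d h

theorem relC_counterAdd (dc : PySem.Dict Char Int) (s : PySem.Set Char)
    (cd : PySem.Dict Char Int) (st : PySem.Set Char)
    (h1 : RelC dc s) (h2 : RelC cd st) :
    RelC (counterAddA dc cd) (PySem.Set.update s st) := by
  unfold counterAddA
  refine ⟨?_, ?_, ?_⟩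
  · exact PySem.Dict.nodup_keys_foldl_modify_key cd.items Prod.fst 0
      (fun _ p => fun v => v + p.2) dc h1.1
  · intro d
    rw [PySem.Dict.keys_foldl_modify_key cd.items Prod.fst 0 (fun _ p => fun v => v + p.2) dc]
    rw [PySem.Set.mem_update, PySem.Set.mem_update]
    have hk : cd.items.map Prod.fst = cd.keys := rfl
    rw [hk, ← h1.2.1 d, ← h2.2.1 d]
  · exact pos_foldAdd cd.items (relC_items_pos cd st h2) dc h1.2.2

theorem coreStep (accA : Int × PySem.Dict Char Int) (accB : Int × PySem.Set Char)
    (cs cs' : Int) (cd : PySem.Dict Char Int) (st : PySem.Set Char)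
    (hcs : cs = cs')
    (hs : accA.1 = accB.1) (hr : RelC accA.2 accB.2) (hc : RelC cd st) :
    ((if cd.keys.all (fun d => accA.2.getD d 0 == 0) then
        (accA.1 + cs, counterAddA accA.2 cd) else accA).1
      = (if PySem.Set.isdisjoint accB.2 st then
        (accB.1 + cs', PySem.Set.update accB.2 st) else accB).1)
    ∧ RelC (if cd.keys.all (fun d => accA.2.getD d 0 == 0) then
        (accA.1 + cs, counterAddA accA.2 cd) else accA).2
        (if PySem.Set.isdisjoint accB.2 st then
        (accB.1 + cs', PySem.Set.update accB.2 st) else accB).2 := by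
  subst hcs
  rw [cond_eq accA.2 accB.2 cd st hr hc]
  cases hb : PySem.Set.isdisjoint accB.2 st
  · simp only [Bool.false_eq_true, if_false]
    exact ⟨hs, hr⟩
  · simp only [if_true]
    exact ⟨by rw [hs], relC_counterAdd accA.2 accB.2 cd st hr hc⟩

theorem foldChildren (rec : Int → Int × PySem.Dict Char Int) (tbl : TblB) (cl : List Int)
    (hc : ∀ c ∈ cl, (rec c).1 = (tbl.getD c dfltB).1 ∧ RelC (rec c).2 (tbl.getD c dfltB).2) :
    ∀ (accA : Int × PySem.Dict Char Int) (accB : Int × PySem.Set Char),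
      accA.1 = accB.1 → RelC accA.2 accB.2 →
      ((cl.foldl (fun acc child =>
          let cr := rec child
          if cr.2.keys.all (fun d => acc.2.getD d 0 == 0) then
            (acc.1 + cr.1, counterAddA acc.2 cr.2)
          else acc) accA).1
        = (cl.foldl (fun acc c =>
          let p := tbl.getD c dfltB
          if PySem.Set.isdisjoint acc.2 p.2 then (acc.1 + p.1, PySem.Set.update acc.2 p.2)
          else acc) accB).1)
      ∧ RelC (cl.foldl (fun acc child =>
          let cr := rec child
          if cr.2.keys.all (fun d => acc.2.getD d 0 == 0) then
            (acc.1 + cr.1, counterAddA acc.2 cr.2)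
          else acc) accA).2
        (cl.foldl (fun acc c =>
          let p := tbl.getD c dfltB
          if PySem.Set.isdisjoint acc.2 p.2 then (acc.1 + p.1, PySem.Set.update acc.2 p.2)
          else acc) accB).2 := by
  induction cl with
  | nil => intro accA accB h1 h2; exact ⟨h1, h2⟩
  | cons c cl ih =>
    intro accA accB h1 h2
    simp only [List.foldl_cons]
    have hmem : c ∈ c :: cl := List.mem_cons_self
    have step := coreStep accA accB ((rec c).1) ((tbl.getD c dfltB).1) ((rec c).2)
      ((tbl.getD c dfltB).2) ((hc c hmem).1) h1 h2 ((hc c hmem).2)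
    exact ih (fun x hx => hc x (List.mem_cons_of_mem _ hx)) _ _ step.1 step.2

theorem relC_counter (cs : List Char) :
    RelC (PySem.Dict.counter cs) (PySem.Set.ofList cs) := by
  refine ⟨PySem.Dict.nodup_keys_counter cs, ?_, ?_⟩
  · intro d; rw [PySem.Dict.keys_counter]
  · intro d hd
    rw [PySem.Dict.getD_counter]
    rw [PySem.Dict.keys_counter, PySem.Set.mem_ofList] at hd
    exact_mod_cast List.count_pos_iff.mpr hd

theorem body_bridge (vals : List Int) (tree : PySem.Dict Int (List Int))
    (children : PySem.Dict Int (List Int)) (table : TblB)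
    (rec : Int → Int × PySem.Dict Char Int) (node : Int)
    (htc : tree = children)
    (hc : ∀ c ∈ tree.getD node [], (rec c).1 = (table.getD c dfltB).1 ∧
        RelC (rec c).2 (table.getD c dfltB).2) :
    (bodyA vals tree rec node).1 = (bodyB vals children table node).1
    ∧ RelC (bodyA vals tree rec node).2 (bodyB vals children table node).2 := by
  subst htc
  unfold bodyA bodyB
  simp only []
  have hf := foldChildren rec table (tree.getD node []) hc
    ((0 : Int), PySem.Dict.empty) ((0 : Int), PySem.Set.empty) rfl relC_empty
  exact coreStep _ _ (PySem.List.pyGetD vals node 0) (PySem.List.pyGetD vals node 0)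
    (PySem.Dict.counter (PySem.Int.toStr (PySem.List.pyGetD vals node 0)).toList)
    (PySem.Set.ofList (PySem.Int.toStr (PySem.List.pyGetD vals node 0)).toList)
    rfl hf.1 hf.2 (relC_counter _)

theorem getD_foldl_insert {α : Type} (f : Int → α) (dD : α) :
    ∀ (l : List Int) (t0 : PySem.Dict Int α) (j : Int),
    (l.foldl (fun t i => t.insert i (f i)) t0).getD j dD
      = if j ∈ l then f j else t0.getD j dD := by
  intro l
  induction l with
  | nil => intro t0 j; simp
  | cons x xs ih =>
    intro t0 j
    simp only [List.foldl_cons]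
    rw [ih]
    by_cases hj : j ∈ xs
    · simp [hj]
    · by_cases hx : j = x
      · subst hx
        simp [hj, PySem.Dict.getD_insert_self]
      · simp [hj, hx, PySem.Dict.getD_insert_of_ne _ _ _ hx]

theorem getD_stepB (vals : List Int) (children : PySem.Dict Int (List Int)) (n : Nat)
    (table : TblB) (j : Int) :
    (stepB vals children n table).getD j dfltB
      = if j ∈ PySem.List.pyRange 0 (n : Int) 1 then bodyB vals children table j else dfltB := by
  unfold stepB
  rw [getD_foldl_insert (bodyB vals children table) dfltB]
  split <;> rfl

theorem getD_tbl0B (n : Nat) (j : Int) : (tbl0B n).getD j dfltB = dfltB := by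
  unfold tbl0B
  rw [getD_foldl_insert (fun _ => dfltB) dfltB]
  split <;> rfl

-- nodes appearing as children in the built tree all lie in [1, n)
theorem mem_build (par : List Int) (l : List Int) :
    ∀ (t0 : PySem.Dict Int (List Int)) (c x : Int),
      x ∈ (l.foldl (fun t i => t.modify (PySem.List.pyGetD par i 0) [] (fun ll => ll ++ [i])) t0).getD c []
      → x ∈ l ∨ x ∈ t0.getD c [] := by
  induction l with
  | nil => intro t0 c x h; exact Or.inr h
  | cons a l ih =>
    intro t0 c x h
    simp only [List.foldl_cons] at h
    rcases ih _ c x h with h' | h'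
    · exact Or.inl (List.mem_cons_of_mem _ h')
    · rw [PySem.Dict.getD_modify] at h'
      by_cases hc : c = PySem.List.pyGetD par a 0
      · subst hc
        rw [if_pos rfl] at h'
        rcases List.mem_append.mp h' with h'' | h''
        · exact Or.inr h''
        · simp at h''
          exact Or.inl (h'' ▸ List.mem_cons_self)
      · rw [if_neg hc] at h'
        exact Or.inr h'

theorem mem_treeA (par : List Int) (n : Nat) (c x : Int)
    (h : x ∈ (treeA par n).getD c []) : 1 ≤ x ∧ x < (n : Int) := by
  unfold treeA at h
  rcases mem_build par _ PySem.Dict.empty c x h with h' | h'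
  · exact PySem.List.mem_pyRange_one.mp h'
  · simp [PySem.Dict.empty] at h'
    cases h'

def jacB (vals : List Int) (children : PySem.Dict Int (List Int)) (n : Nat) (k : Nat) : TblB :=
  (stepB vals children n)^[k] (tbl0B n)

-- round k of the Jacobi iteration = depth-k truncated dfs, at every node
theorem bridge (vals par : List Int) :
    ∀ (k : Nat) (node : Int), 0 ≤ node → node < (vals.length : Int) →
    (dfsA vals (treeA par vals.length) k node).1
      = ((jacB vals (childrenB par vals.length) vals.length k).getD node dfltB).1
    ∧ RelC (dfsA vals (treeA par vals.length) k node).2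
      ((jacB vals (childrenB par vals.length) vals.length k).getD node dfltB).2 := by
  intro k
  induction k with
  | zero =>
    intro node h0 hn
    unfold jacB
    rw [Function.iterate_zero_apply, getD_tbl0B]
    exact ⟨rfl, relC_empty⟩
  | succ k ih =>
    intro node h0 hn
    have hmem : node ∈ PySem.List.pyRange 0 (vals.length : Int) 1 :=
      PySem.List.mem_pyRange_one.mpr ⟨h0, hn⟩
    unfold jacB
    rw [Function.iterate_succ_apply']
    rw [show ((stepB vals (childrenB par vals.length) vals.length)^[k] (tbl0B vals.length))
        = jacB vals (childrenB par vals.length) vals.length k from rfl]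
    rw [getD_stepB, if_pos hmem]
    show (bodyA vals (treeA par vals.length) (dfsA vals (treeA par vals.length) k) node).1 = _ ∧ _
    apply body_bridge
    · rfl
    · intro c hcmem
      have hb := mem_treeA par vals.length node c hcmem
      exact ih c (by omega) hb.2

-- pointwise table equivalence: equal scores, equal digit sets (as sets)
def PEqB (t t' : TblB) : Prop :=
  ∀ i : Int, (t.getD i dfltB).1 = (t'.getD i dfltB).1
    ∧ ∀ d, (d ∈ (t.getD i dfltB).2 ↔ d ∈ (t'.getD i dfltB).2)

theorem peq_refl (t : TblB) : PEqB t t := fun _ => ⟨rfl, fun _ => Iff.rfl⟩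

theorem peq_symm {t t' : TblB} (h : PEqB t t') : PEqB t' t :=
  fun i => ⟨(h i).1.symm, fun d => ((h i).2 d).symm⟩

theorem peq_trans {t t' t'' : TblB} (h : PEqB t t') (h' : PEqB t' t'') : PEqB t t'' :=
  fun i => ⟨(h i).1.trans (h' i).1, fun d => ((h i).2 d).trans ((h' i).2 d)⟩

theorem isdisjoint_congr (s s' u u' : PySem.Set Char)
    (hs : ∀ d, d ∈ s ↔ d ∈ s') (hu : ∀ d, d ∈ u ↔ d ∈ u') :
    PySem.Set.isdisjoint s u = PySem.Set.isdisjoint s' u' := by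
  apply bool_ext
  rw [PySem.Set.isdisjoint_iff, PySem.Set.isdisjoint_iff]
  constructor
  · intro H x hx hxu; exact H x ((hs x).mpr hx) ((hu x).mpr hxu)
  · intro H x hx hxu; exact H x ((hs x).mp hx) ((hu x).mp hxu)

theorem setStep_cong (r r' : Int × PySem.Set Char) (v v' : Int) (u u' : PySem.Set Char)
    (h1 : r.1 = r'.1) (h2 : ∀ d, d ∈ r.2 ↔ d ∈ r'.2) (hv : v = v')
    (hu : ∀ d, d ∈ u ↔ d ∈ u') :
    ((if PySem.Set.isdisjoint r.2 u then (r.1 + v, PySem.Set.update r.2 u) else r).1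
      = (if PySem.Set.isdisjoint r'.2 u' then (r'.1 + v', PySem.Set.update r'.2 u') else r').1)
    ∧ ∀ d, (d ∈ (if PySem.Set.isdisjoint r.2 u then (r.1 + v, PySem.Set.update r.2 u) else r).2
      ↔ d ∈ (if PySem.Set.isdisjoint r'.2 u' then (r'.1 + v', PySem.Set.update r'.2 u') else r').2) := by
  subst hv
  rw [isdisjoint_congr r.2 r'.2 u u' h2 hu]
  cases hb : PySem.Set.isdisjoint r'.2 u'
  · simp only [Bool.false_eq_true, if_false]
    exact ⟨h1, h2⟩
  · simp only [if_true]
    refine ⟨by rw [h1], ?_⟩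
    intro d
    rw [PySem.Set.mem_update, PySem.Set.mem_update, h2 d, hu d]

theorem cong_body (vals : List Int) (children : PySem.Dict Int (List Int))
    (t t' : TblB) (node : Int) (h : PEqB t t') :
    (bodyB vals children t node).1 = (bodyB vals children t' node).1
    ∧ ∀ d, (d ∈ (bodyB vals children t node).2 ↔ d ∈ (bodyB vals children t' node).2) := by
  unfold bodyB
  simp only []
  have main : ∀ (cl : List Int) (accB accB' : Int × PySem.Set Char),
      accB.1 = accB'.1 → (∀ d, d ∈ accB.2 ↔ d ∈ accB'.2) →
      ((cl.foldl (fun acc c =>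
          let p := t.getD c dfltB
          if PySem.Set.isdisjoint acc.2 p.2 then (acc.1 + p.1, PySem.Set.update acc.2 p.2)
          else acc) accB).1
        = (cl.foldl (fun acc c =>
          let p := t'.getD c dfltB
          if PySem.Set.isdisjoint acc.2 p.2 then (acc.1 + p.1, PySem.Set.update acc.2 p.2)
          else acc) accB').1)
      ∧ ∀ d, (d ∈ (cl.foldl (fun acc c =>
          let p := t.getD c dfltB
          if PySem.Set.isdisjoint acc.2 p.2 then (acc.1 + p.1, PySem.Set.update acc.2 p.2)
          else acc) accB).2 ↔ d ∈ (cl.foldl (fun acc c =>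
          let p := t'.getD c dfltB
          if PySem.Set.isdisjoint acc.2 p.2 then (acc.1 + p.1, PySem.Set.update acc.2 p.2)
          else acc) accB').2) := by
    intro cl
    induction cl with
    | nil => intro accB accB' h1 h2; exact ⟨h1, h2⟩
    | cons c cl ih =>
      intro accB accB' h1 h2
      simp only [List.foldl_cons]
      have step := setStep_cong accB accB' ((t.getD c dfltB).1) ((t'.getD c dfltB).1)
        ((t.getD c dfltB).2) ((t'.getD c dfltB).2) h1 h2 ((h c).1) ((h c).2)
      exact ih _ _ step.1 step.2
  have hm := main (children.getD node []) ((0 : Int), PySem.Set.empty)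
    ((0 : Int), PySem.Set.empty) rfl (fun _ => Iff.rfl)
  exact setStep_cong _ _ (PySem.List.pyGetD vals node 0) (PySem.List.pyGetD vals node 0)
    (PySem.Set.ofList (PySem.Int.toStr (PySem.List.pyGetD vals node 0)).toList)
    (PySem.Set.ofList (PySem.Int.toStr (PySem.List.pyGetD vals node 0)).toList)
    hm.1 hm.2 rfl (fun _ => Iff.rfl)

theorem cong_stepB (vals : List Int) (children : PySem.Dict Int (List Int)) (n : Nat)
    (t t' : TblB) (h : PEqB t t') :
    PEqB (stepB vals children n t) (stepB vals children n t') := by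
  intro i
  rw [getD_stepB, getD_stepB]
  by_cases hm : i ∈ PySem.List.pyRange 0 (n : Int) 1
  · rw [if_pos hm, if_pos hm]
    exact cong_body vals children t t' i h
  · rw [if_neg hm, if_neg hm]
    exact ⟨rfl, fun _ => Iff.rfl⟩

def OKB (n : Nat) (t : TblB) : Prop :=
  ∀ j : Int, ¬(0 ≤ j ∧ j < (n : Int)) → t.getD j dfltB = dfltB

theorem okb_tbl0B (n : Nat) : OKB n (tbl0B n) := fun j _ => getD_tbl0B n j

theorem okb_stepB (vals : List Int) (children : PySem.Dict Int (List Int)) (n : Nat)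
    (t : TblB) : OKB n (stepB vals children n t) := by
  intro j hj
  rw [getD_stepB]
  rw [if_neg (fun hm => hj (PySem.List.mem_pyRange_one.mp hm))]

theorem peq_of_tblEq (vals : List Int) (children : PySem.Dict Int (List Int)) (n : Nat)
    (t : TblB) (ht : OKB n t)
    (h : tblEqB n (stepB vals children n t) t = true) :
    PEqB (stepB vals children n t) t := by
  intro i
  by_cases hi : 0 ≤ i ∧ i < (n : Int)
  · have hm : i ∈ PySem.List.pyRange 0 (n : Int) 1 := PySem.List.mem_pyRange_one.mpr hi
    unfold tblEqB at h
    rw [List.all_eq_true] at h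
    have := h i hm
    rw [Bool.and_eq_true] at this
    exact ⟨by exact_mod_cast beq_iff_eq.mp this.1, (PySem.Set.equal_iff _ _).mp this.2⟩
  · rw [okb_stepB vals children n t i hi, ht i hi]
    exact ⟨rfl, fun _ => Iff.rfl⟩

theorem stable_iter (vals : List Int) (children : PySem.Dict Int (List Int)) (n : Nat)
    (t : TblB) (h : PEqB (stepB vals children n t) t) :
    ∀ j, PEqB ((stepB vals children n)^[j] t) t := by
  intro j
  induction j with
  | zero => exact peq_refl t
  | succ j ih =>
    rw [Function.iterate_succ_apply']
    exact peq_trans (cong_stepB vals children n _ _ ih) h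

theorem loopB_peq (vals : List Int) (children : PySem.Dict Int (List Int)) (n : Nat) :
    ∀ (k : Nat) (t : TblB), OKB n t →
    PEqB (loopB vals children n k t) ((stepB vals children n)^[k] t) := by
  intro k
  induction k with
  | zero => intro t _; exact peq_refl t
  | succ k ih =>
    intro t ht
    show PEqB (if tblEqB n (stepB vals children n t) t then t
        else loopB vals children n k (stepB vals children n t)) _
    by_cases h : tblEqB n (stepB vals children n t) t = true
    · rw [if_pos h]
      exact peq_symm (stable_iter vals children n t (peq_of_tblEq vals children n t ht h) (k+1))
    · rw [if_neg h, Function.iterate_succ_apply]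
      exact ih (stepB vals children n t) (okb_stepB vals children n t)

theorem foldl_mod (f : Int → Int) :
    ∀ (l : List Int) (a : Int),
    l.foldl (fun t i => PySem.Int.mod (t + f i) 1000000007) (PySem.Int.mod a 1000000007)
      = PySem.Int.mod (l.foldl (fun t i => t + f i) a) 1000000007 := by
  intro l
  induction l with
  | nil => intro a; rfl
  | cons x xs ih =>
    intro a
    simp only [List.foldl_cons]
    rw [show PySem.Int.mod (PySem.Int.mod a 1000000007 + f x) 1000000007
        = PySem.Int.mod (a + f x) 1000000007 from ?_]
    · exact ih (a + f x)
    · rw [PySem.Int.mod_eq_emod_of_pos (by norm_num), PySem.Int.mod_eq_emod_of_pos (by norm_num),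
        PySem.Int.mod_eq_emod_of_pos (by norm_num), Int.add_emod,
        Int.emod_emod_of_dvd _ dvd_rfl, ← Int.add_emod]

theorem foldl_mod0 (f : Int → Int) (l : List Int) :
    l.foldl (fun t i => PySem.Int.mod (t + f i) 1000000007) 0
      = PySem.Int.mod (l.foldl (fun t i => t + f i) 0) 1000000007 := by
  have h := foldl_mod f l 0
  rw [show PySem.Int.mod 0 1000000007 = 0 from by decide] at h
  exact h

-- ===== VERDICT (by name: the statement is the Claim_ definition above) =====
theorem solve_spec : Claim_equal_solve := by
  intro vals par _ _
  unfold Spec_solve solve solve_alt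
  simp only []
  rw [foldl_mod0 (fun i => (dfsA vals (treeA par vals.length) (vals.length+1) i).1)]
  congr 1
  apply PySem.List.foldl_congr_mem
  intro acc i hi
  have hb := PySem.List.mem_pyRange_one.mp hi
  have h1 := (bridge vals par (vals.length+1) i hb.1 hb.2).1
  have h2 := (loopB_peq vals (childrenB par vals.length) vals.length (vals.length+1)
    (tbl0B vals.length) (okb_tbl0B vals.length) i).1
  rw [h1]
  unfold jacB
  rw [← h2]
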